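-- pv_equiv track=rewrite | github.com/oskhar/file-to-video-convert | quick-response-code/algoritm.py | _reed_solomon_multiply
-- ===== SOURCE A (Python) =====
-- def _reed_solomon_multiply(x: int, y: int) -> int:
-- 	if (x >> 8 != 0) or (y >> 8 != 0):
-- 		raise ValueError("Byte out of range")
-- 	z: int = 0
-- 	for i in reversed(range(8)):
-- 		z = (z << 1) ^ ((z >> 7) * 0x11D)
-- 		z ^= ((y >> i) & 1) * x
-- 	assert z >> 8 == 0
-- 	return z
-- ===== SOURCE B (Python) =====
-- # GF(256) multiply via discrete-log tables (primitive element 0x02, poly 0x11D)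
-- _EXP = [0] * 255
-- _LOG = [0] * 256
-- _t = 1
-- for _i in range(255):
--     _EXP[_i] = _t
--     _LOG[_t] = _i
--     _t <<= 1
--     if _t & 0x100:
--         _t ^= 0x11D
--
-- def _reed_solomon_multiply(x: int, y: int) -> int:
--     if (x >> 8 != 0) or (y >> 8 != 0):
--         raise ValueError("Byte out of range")
--     if x == 0 or y == 0:
--         return 0
--     return _EXP[(_LOG[x] + _LOG[y]) % 255]
-- ===== Notes on version B (the rewrite author's own statement) =====
-- stated objective: alternative
-- what changed: Replaces the MSB-first bit-by-bit carryless multiply-and-reduce loop with precomputed GF(256) log/antilog tables (primitive element 0x02, polynomial 0x11D): the product is antilog[(log x + log y) % 255], with zero special-cased.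
import Mathlib
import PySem

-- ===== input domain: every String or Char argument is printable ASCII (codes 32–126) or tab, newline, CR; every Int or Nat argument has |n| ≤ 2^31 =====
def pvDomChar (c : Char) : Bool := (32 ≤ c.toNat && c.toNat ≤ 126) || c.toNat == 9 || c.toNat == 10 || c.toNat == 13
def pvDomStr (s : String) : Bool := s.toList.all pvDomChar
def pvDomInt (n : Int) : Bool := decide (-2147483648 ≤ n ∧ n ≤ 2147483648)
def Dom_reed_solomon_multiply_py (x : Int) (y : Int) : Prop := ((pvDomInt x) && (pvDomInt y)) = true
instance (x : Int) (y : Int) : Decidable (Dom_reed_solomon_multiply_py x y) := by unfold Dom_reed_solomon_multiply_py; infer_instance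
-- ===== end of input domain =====

-- B replaces A's MSB-first bit-by-bit multiply-and-reduce loop by precomputed GF(256) log/antilog tables (alternative algorithm, same exact values).

-- ===== PORT A =====
-- Python '>>' on int is floor division by a power of two; 'z << 1' is 'z * 2'; '^'/'&' are PySem.Int.bxor/band (exact).
def reed_solomon_multiply_py (x : Int) (y : Int) : Int :=
  if PySem.Int.floordiv x 256 ≠ 0 ∨ PySem.Int.floordiv y 256 ≠ 0 then 0  -- raise ValueError("Byte out of range"); excluded by Pre_
  else
    ((PySem.List.pyRange 0 8 1).reverse).foldl  -- for i in reversed(range(8))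
      (fun z i =>
        let z1 := PySem.Int.bxor (z * 2) (PySem.Int.floordiv z 128 * 285)  -- z = (z << 1) ^ ((z >> 7) * 0x11D)
        PySem.Int.bxor z1 (PySem.Int.band (PySem.Int.floordiv y (2 ^ i.toNat)) 1 * x))  -- z ^= ((y >> i) & 1) * x
      0

-- ===== PORT B =====
-- module-level table build of Source B: one pass filling _EXP and _LOG (preallocated lists, List.set = item assignment)
def pvTables : List Int × List Int :=
  let s :=
    (List.range 255).foldl
      (fun (s : List Int × List Int × Int) i =>
        let e := s.1.set i s.2.2                                  -- _EXP[_i] = _t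
        let l := s.2.1.set s.2.2.toNat (Int.ofNat i)              -- _LOG[_t] = _i  (index is a byte; toNat exact)
        let t := s.2.2 * 2                                        -- _t <<= 1
        let t := if PySem.Int.band t 256 ≠ 0 then PySem.Int.bxor t 285 else t  -- if _t & 0x100: _t ^= 0x11D
        (e, l, t))
      (List.replicate 255 0, List.replicate 256 0, 1)
  (s.1, s.2.1)

def pvExpTab : List Int := pvTables.1
def pvLogTab : List Int := pvTables.2

def reed_solomon_multiply_py_alt (x : Int) (y : Int) : Int :=
  if PySem.Int.floordiv x 256 ≠ 0 ∨ PySem.Int.floordiv y 256 ≠ 0 then 0  -- raise ValueError("Byte out of range"); excluded by Pre_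
  else if x = 0 ∨ y = 0 then 0
  else pvExpTab.getD (((pvLogTab.getD x.toNat 0) + (pvLogTab.getD y.toNat 0)).toNat % 255) 0
    -- list indexing _EXP[..]/_LOG[..]: indices provably in range here, so getD is exact

-- ===== PRECONDITION & SPEC =====
-- Pre_ excludes exactly the inputs on which A raises ValueError (x >> 8 != 0 or y >> 8 != 0): bytes only.
def Pre_reed_solomon_multiply_py (x : Int) (y : Int) : Prop := 0 ≤ x ∧ x < 256 ∧ 0 ≤ y ∧ y < 256
instance (x : Int) (y : Int) : Decidable (Pre_reed_solomon_multiply_py x y) := by unfold Pre_reed_solomon_multiply_py; infer_instance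
def pvWitness_reed_solomon_multiply_py : Int × Int := (3, 7)

def Spec_reed_solomon_multiply_py (x : Int) (y : Int) (out : Int) : Prop := out = reed_solomon_multiply_py_alt x y
instance (x : Int) (y : Int) (out : Int) : Decidable (Spec_reed_solomon_multiply_py x y out) := by unfold Spec_reed_solomon_multiply_py; infer_instance

-- ===== CLAIM (what is proved, stated in full; the proofs are below) =====
def Claim_equal_reed_solomon_multiply_py : Prop := ∀ (x : Int) (y : Int), Dom_reed_solomon_multiply_py x y → Pre_reed_solomon_multiply_py x y → Spec_reed_solomon_multiply_py x y (reed_solomon_multiply_py x y)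

-- ===== LEMMAS AND PROOFS =====

-- the 'xtime' step of A's loop, at Nat level
def gN (z : Nat) : Nat := (z <<< 1) ^^^ ((z >>> 7) * 285)

-- A's loop at Nat level
def fA (a b : Nat) : Nat :=
  List.foldl (fun z i => gN z ^^^ (((b >>> i) &&& 1) * a)) 0 [7, 6, 5, 4, 3, 2, 1, 0]

-- the two tables as literals (Nat level)
def pvExpLitN : List Nat := [1, 2, 4, 8, 16, 32, 64, 128, 29, 58, 116, 232, 205, 135, 19, 38, 76, 152, 45, 90, 180, 117, 234, 201, 143, 3, 6, 12, 24, 48, 96, 192, 157, 39, 78, 156, 37, 74, 148, 53, 106, 212, 181, 119, 238, 193, 159, 35, 70, 140, 5, 10, 20, 40, 80, 160, 93, 186, 105, 210, 185, 111, 222, 161, 95, 190, 97, 194, 153, 47, 94, 188, 101, 202, 137, 15, 30, 60, 120, 240, 253, 231, 211, 187, 107, 214, 177, 127, 254, 225, 223, 163, 91, 182, 113, 226, 217, 175, 67, 134, 17, 34, 68, 136, 13, 26, 52, 104, 208, 189, 103, 206, 129, 31, 62, 124, 248, 237, 199, 147, 59, 118, 236, 197, 151, 51, 102, 204, 133, 23,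 46, 92, 184, 109, 218, 169, 79, 158, 33, 66, 132, 21, 42, 84, 168, 77, 154, 41, 82, 164, 85, 170, 73, 146, 57, 114, 228, 213, 183, 115, 230, 209, 191, 99, 198, 145, 63, 126, 252, 229, 215, 179, 123, 246, 241, 255, 227, 219, 171, 75, 150, 49, 98, 196, 149, 55, 110, 220, 165, 87, 174, 65, 130, 25, 50, 100, 200, 141, 7, 14, 28, 56, 112, 224, 221, 167, 83, 166, 81, 162, 89, 178, 121, 242, 249, 239, 195, 155, 43, 86, 172, 69, 138, 9, 18, 36, 72, 144, 61, 122, 244, 245, 247, 243, 251, 235, 203, 139, 11, 22, 44, 88, 176, 125, 250, 233, 207, 131, 27, 54, 108, 216, 173, 71, 142]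
def pvLogLitN : List Nat := [0, 0, 1, 25, 2, 50, 26, 198, 3, 223, 51, 238, 27, 104, 199, 75, 4, 100, 224, 14, 52, 141, 239, 129, 28, 193, 105, 248, 200, 8, 76, 113, 5, 138, 101, 47, 225, 36, 15, 33, 53, 147, 142, 218, 240, 18, 130, 69, 29, 181, 194, 125, 106, 39, 249, 185, 201, 154, 9, 120, 77, 228, 114, 166, 6, 191, 139, 98, 102, 221, 48, 253, 226, 152, 37, 179, 16, 145, 34, 136, 54, 208, 148, 206, 143, 150, 219, 189, 241, 210, 19, 92, 131, 56, 70, 64, 30, 66, 182, 163, 195, 72, 126, 110, 107, 58, 40, 84, 250, 133, 186, 61, 202, 94, 155, 159, 10, 21, 121, 43, 78, 212, 229, 172, 115, 243, 167, 87, 7, 112, 192, 247, 140, 128, 99, 13, 103, 74, 222, 237, 49, 197, 254, 24, 227, 165, 153, 119, 38, 184, 180, 124, 17, 68, 146, 217, 35, 32, 137, 46, 55, 63, 209, 91, 149, 188, 207, 205, 144, 135, 151, 178, 220, 252, 190, 97, 242, 86, 211, 171, 20, 42, 93, 158, 132, 60, 57, 83, 71, 109, 65, 162, 31, 45, 67,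 216, 183, 123, 164, 118, 196, 23, 73, 236, 127, 12, 111, 246, 108, 161, 59, 82, 41, 157, 85, 170, 251, 96, 134, 177, 187, 204, 62, 90, 203, 89, 95, 176, 156, 169, 160, 81, 11, 245, 22, 235, 122, 117, 44, 215, 79, 174, 213, 233, 230, 231, 173, 232, 116, 214, 244, 234, 168, 80, 88, 175]

set_option maxRecDepth 2000000 in
theorem tables_eq : pvTables = (pvExpLitN.map Int.ofNat, pvLogLitN.map Int.ofNat) := by rfl

theorem range_rev : (PySem.List.pyRange 0 8 1).reverse = [7, 6, 5, 4, 3, 2, 1, 0] := by decide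

set_option maxRecDepth 40000 in
theorem g_lt : ∀ z, z < 256 → gN z < 256 := by decide

set_option maxRecDepth 10000 in
theorem fA_one_aux : ((List.range 256).all fun b => fA 1 b == b) = true := by decide

theorem fA_one (b : Nat) (hb : b < 256) : fA 1 b = b := by
  have h := fA_one_aux
  rw [List.all_eq_true] at h
  exact eq_of_beq (h b (List.mem_range.mpr hb))

set_option maxRecDepth 100000 in
theorem exp_chain_aux : ((List.range 254).all fun r => pvExpLitN.getD (r + 1) 0 == gN (pvExpLitN.getD r 0)) = true := by decide

set_option maxRecDepth 100000 in
theorem log_surj_aux : ((List.range 256).all fun a =>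
    (a == 0) || ((pvLogLitN.getD a 0 < 255 : Bool) && (pvExpLitN.getD (pvLogLitN.getD a 0) 0 == a))) = true := by decide

theorem exp_giter : ∀ r, r < 255 → pvExpLitN.getD r 0 = gN^[r] 1 := by
  intro r
  induction r with
  | zero => intro _; rfl
  | succ n ih =>
    intro h
    have hc := exp_chain_aux
    rw [List.all_eq_true] at hc
    have := eq_of_beq (hc n (List.mem_range.mpr (by omega)))
    rw [this, ih (by omega), Function.iterate_succ_apply']

set_option maxRecDepth 4000 in
theorem g_period : gN^[255] 1 = 1 := by decide

theorem giter_lt : ∀ i, gN^[i] 1 < 256 := by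
  intro i
  induction i with
  | zero => decide
  | succ n ih => rw [Function.iterate_succ_apply']; exact g_lt _ ih

theorem log_spec (a : Nat) (h0 : 0 < a) (h : a < 256) :
    pvLogLitN.getD a 0 < 255 ∧ gN^[pvLogLitN.getD a 0] 1 = a := by
  have hs := log_surj_aux
  rw [List.all_eq_true] at hs
  have := hs a (List.mem_range.mpr h)
  simp only [Bool.or_eq_true, Bool.and_eq_true, beq_iff_eq, decide_eq_true_eq] at this
  rcases this with h' | ⟨h1, h2⟩
  · omega
  · exact ⟨h1, by rw [← exp_giter _ h1, h2]⟩

-- linearity of gN over XOR on bytes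
theorem g_xor (u v : Nat) (hu : u < 256) (hv : v < 256) : gN (u ^^^ v) = gN u ^^^ gN v := by
  unfold gN
  rw [Nat.shiftLeft_xor_distrib, Nat.shiftRight_xor_distrib]
  have hu7 : u >>> 7 = u / 128 := by rw [Nat.shiftRight_eq_div_pow]
  have hv7 : v >>> 7 = v / 128 := by rw [Nat.shiftRight_eq_div_pow]
  have h1 : u >>> 7 = 0 ∨ u >>> 7 = 1 := by omega
  have h2 : v >>> 7 = 0 ∨ v >>> 7 = 1 := by omega
  rcases h1 with h1 | h1 <;> rcases h2 with h2 | h2 <;>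
    simp [h1, h2, Nat.xor_assoc, Nat.xor_comm, Nat.xor_left_comm]

-- the loop commutes with gN (induction over the remaining bit indices)
theorem loopg (b : Nat) : ∀ (l : List Nat) (z a : Nat), z < 256 → a < 256 →
    List.foldl (fun z i => gN z ^^^ (((b >>> i) &&& 1) * gN a)) (gN z) l
      = gN (List.foldl (fun z i => gN z ^^^ (((b >>> i) &&& 1) * a)) z l) := by
  intro l
  induction l with
  | nil => intro z a _ _; rfl
  | cons i l ih =>
    intro z a hz ha
    simp only [List.foldl_cons]
    have hbit : (b >>> i) &&& 1 = 0 ∨ (b >>> i) &&& 1 = 1 := by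
      have := Nat.and_one_is_mod (b >>> i); omega
    have hstep : gN (gN z) ^^^ ((b >>> i) &&& 1) * gN a = gN (gN z ^^^ ((b >>> i) &&& 1) * a) := by
      rcases hbit with h | h
      · simp [h]
      · rw [h, Nat.one_mul, Nat.one_mul, g_xor _ _ (g_lt _ hz) ha]
    rw [hstep]
    exact ih _ a (Nat.xor_lt_two_pow (n := 8) (g_lt _ hz) (by rcases hbit with h | h <;> rw [h] <;> omega)) ha

theorem fA_g (a b : Nat) (ha : a < 256) : fA (gN a) b = gN (fA a b) := by
  have h := loopg b [7, 6, 5, 4, 3, 2, 1, 0] 0 a (by decide) ha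
  rw [show gN 0 = 0 from rfl] at h
  exact h

theorem fA_giter (i b : Nat) : fA (gN^[i] 1) b = gN^[i] (fA 1 b) := by
  induction i with
  | zero => rfl
  | succ n ih =>
    rw [Function.iterate_succ_apply', Function.iterate_succ_apply', fA_g _ _ (giter_lt n), ih]

-- cast of one loop step from the Int port to the Nat loop
theorem step_cast (z a b n : Nat) :
    PySem.Int.bxor (PySem.Int.bxor ((z : Int) * 2) (PySem.Int.floordiv (z : Int) 128 * 285))
        (PySem.Int.band (PySem.Int.floordiv (b : Int) (2 ^ ((n : Int)).toNat)) 1 * (a : Int))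
      = ((gN z ^^^ (((b >>> n) &&& 1) * a) : Nat) : Int) := by
  rw [show (2 : Int) = ((2 : Nat) : Int) from rfl, show (285 : Int) = ((285 : Nat) : Int) from rfl,
      show (128 : Int) = ((128 : Nat) : Int) from rfl, show (1 : Int) = ((1 : Nat) : Int) from rfl,
      Int.toNat_natCast]
  rw [show ((2 : Nat) : Int) ^ n = (((2 : Nat) ^ n : Nat) : Int) by push_cast; ring]
  rw [PySem.Int.floordiv_natCast, PySem.Int.floordiv_natCast]
  rw [show (((z / 128 : Nat) : Int)) * ((285 : Nat) : Int) = (((z / 128) * 285 : Nat) : Int) by push_cast; ring]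
  rw [show ((z : Int) * ((2 : Nat) : Int)) = ((z * 2 : Nat) : Int) by push_cast; ring]
  rw [PySem.Int.bxor_natCast, PySem.Int.band_natCast]
  rw [show (((b / 2 ^ n &&& 1 : Nat) : Int)) * ((a : Nat) : Int) = (((b / 2 ^ n &&& 1) * a : Nat) : Int) by push_cast; ring]
  rw [PySem.Int.bxor_natCast]
  congr 1
  simp [gN, Nat.shiftLeft_eq, Nat.shiftRight_eq_div_pow]

theorem loop_cast (a b : Nat) : ∀ (l : List Nat) (z : Nat),
    List.foldl
      (fun z i =>
        PySem.Int.bxor (PySem.Int.bxor (z * 2) (PySem.Int.floordiv z 128 * 285))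
          (PySem.Int.band (PySem.Int.floordiv (b : Int) (2 ^ i.toNat)) 1 * (a : Int)))
      ((z : Nat) : Int) (l.map (fun n : Nat => (n : Int)))
      = ((List.foldl (fun z i => gN z ^^^ (((b >>> i) &&& 1) * a)) z l : Nat) : Int) := by
  intro l
  induction l with
  | nil => intro z; rfl
  | cons i l ih =>
    intro z
    simp only [List.map_cons, List.foldl_cons]
    rw [step_cast z a b i]
    exact ih _

theorem A_cast (a b : Nat) (ha : a < 256) (hb : b < 256) :
    reed_solomon_multiply_py (a : Int) (b : Int) = ((fA a b : Nat) : Int) := by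
  unfold reed_solomon_multiply_py
  have hga : PySem.Int.floordiv ((a : Nat) : Int) 256 = 0 := by
    rw [show (256 : Int) = ((256 : Nat) : Int) from rfl, PySem.Int.floordiv_natCast, Nat.div_eq_of_lt ha]
    rfl
  have hgb : PySem.Int.floordiv ((b : Nat) : Int) 256 = 0 := by
    rw [show (256 : Int) = ((256 : Nat) : Int) from rfl, PySem.Int.floordiv_natCast, Nat.div_eq_of_lt hb]
    rfl
  rw [if_neg (not_or.mpr ⟨fun h => h hga, fun h => h hgb⟩)]
  rw [range_rev]
  have hmap : ([7, 6, 5, 4, 3, 2, 1, 0] : List Int) = ([7, 6, 5, 4, 3, 2, 1, 0] : List Nat).map (fun n : Nat => (n : Int)) := by decide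
  rw [hmap]
  have h0 : (0 : Int) = ((0 : Nat) : Int) := rfl
  rw [h0, loop_cast a b [7, 6, 5, 4, 3, 2, 1, 0] 0]
  rfl

theorem getD_exp (n : Nat) : pvExpTab.getD n 0 = ((pvExpLitN.getD n 0 : Nat) : Int) := by
  unfold pvExpTab
  rw [tables_eq]
  simp only [List.getD, List.getElem?_map]
  cases pvExpLitN[n]? <;> simp [Int.ofNat_eq_natCast]

theorem getD_log (n : Nat) : pvLogTab.getD n 0 = ((pvLogLitN.getD n 0 : Nat) : Int) := by
  unfold pvLogTab
  rw [tables_eq]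
  simp only [List.getD, List.getElem?_map]
  cases pvLogLitN[n]? <;> simp [Int.ofNat_eq_natCast]

theorem fA_zero_left (b : Nat) : fA 0 b = 0 := by
  simp [fA, gN]

theorem fA_zero_right (a : Nat) : fA a 0 = 0 := by
  simp [fA, gN]

-- the two Nat-level results agree on nonzero bytes
theorem main_nonzero (a b : Nat) (ha0 : 0 < a) (ha : a < 256) (hb0 : 0 < b) (hb : b < 256) :
    fA a b = pvExpLitN.getD ((pvLogLitN.getD a 0 + pvLogLitN.getD b 0) % 255) 0 := by
  obtain ⟨hia, hga⟩ := log_spec a ha0 ha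
  obtain ⟨hib, hgb⟩ := log_spec b hb0 hb
  set i := pvLogLitN.getD a 0 with hi
  set j := pvLogLitN.getD b 0 with hj
  have h1 : fA a b = gN^[i + j] 1 := by
    rw [← hga, fA_giter, fA_one _ hb, ← hgb, ← Function.iterate_add_apply]
  have h2 : gN^[i + j] 1 = gN^[(i + j) % 255] 1 := by
    by_cases hcase : i + j < 255
    · rw [Nat.mod_eq_of_lt hcase]
    · have hr : (i + j) % 255 = i + j - 255 := by omega
      rw [hr]
      conv_lhs => rw [← Nat.sub_add_cancel (Nat.le_of_not_lt hcase), Function.iterate_add_apply, g_period]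
  rw [h1, h2, exp_giter _ (Nat.mod_lt _ (by norm_num))]

theorem B_eval (a b : Nat) (ha0 : 0 < a) (ha : a < 256) (hb0 : 0 < b) (hb : b < 256) :
    reed_solomon_multiply_py_alt (a : Int) (b : Int)
      = ((pvExpLitN.getD ((pvLogLitN.getD a 0 + pvLogLitN.getD b 0) % 255) 0 : Nat) : Int) := by
  unfold reed_solomon_multiply_py_alt
  have hga : PySem.Int.floordiv ((a : Nat) : Int) 256 = 0 := by
    rw [show (256 : Int) = ((256 : Nat) : Int) from rfl, PySem.Int.floordiv_natCast, Nat.div_eq_of_lt ha]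
    rfl
  have hgb : PySem.Int.floordiv ((b : Nat) : Int) 256 = 0 := by
    rw [show (256 : Int) = ((256 : Nat) : Int) from rfl, PySem.Int.floordiv_natCast, Nat.div_eq_of_lt hb]
    rfl
  rw [if_neg (not_or.mpr ⟨fun h => h hga, fun h => h hgb⟩)]
  rw [if_neg (not_or.mpr ⟨by simp only [Int.natCast_eq_zero]; omega, by simp only [Int.natCast_eq_zero]; omega⟩)]
  rw [Int.toNat_natCast, Int.toNat_natCast, getD_log a, getD_log b, getD_exp]
  have ht : ((pvLogLitN.getD a 0 : Int) + (pvLogLitN.getD b 0 : Int)).toNat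
      = pvLogLitN.getD a 0 + pvLogLitN.getD b 0 := by omega
  rw [ht]

-- ===== VERDICT (by name: the statement is the Claim_ definition above) =====
theorem reed_solomon_multiply_py_spec : Claim_equal_reed_solomon_multiply_py := by
  intro x y _ hpre
  obtain ⟨hx0, hx, hy0, hy⟩ := hpre
  unfold Spec_reed_solomon_multiply_py
  obtain ⟨a, rfl⟩ := Int.eq_ofNat_of_zero_le hx0
  obtain ⟨b, rfl⟩ := Int.eq_ofNat_of_zero_le hy0
  have ha : a < 256 := by exact_mod_cast hx
  have hb : b < 256 := by exact_mod_cast hy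
  rcases Nat.eq_zero_or_pos a with ha0 | ha0
  · subst ha0
    rw [A_cast 0 b (by norm_num) hb, fA_zero_left]
    unfold reed_solomon_multiply_py_alt
    have hgb : PySem.Int.floordiv ((b : Nat) : Int) 256 = 0 := by
      rw [show (256 : Int) = ((256 : Nat) : Int) from rfl, PySem.Int.floordiv_natCast, Nat.div_eq_of_lt hb]
      rfl
    rw [if_neg (not_or.mpr ⟨fun h => h (by decide), fun h => h hgb⟩)]
    rw [if_pos (Or.inl (by decide))]
    rfl
  rcases Nat.eq_zero_or_pos b with hb0 | hb0
  · subst hb0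
    rw [A_cast a 0 ha (by norm_num), fA_zero_right]
    unfold reed_solomon_multiply_py_alt
    have hga : PySem.Int.floordiv ((a : Nat) : Int) 256 = 0 := by
      rw [show (256 : Int) = ((256 : Nat) : Int) from rfl, PySem.Int.floordiv_natCast, Nat.div_eq_of_lt ha]
      rfl
    rw [if_neg (not_or.mpr ⟨fun h => h hga, fun h => h (by decide)⟩)]
    rw [if_pos (Or.inr (by decide))]
    rfl
  · rw [A_cast a b ha hb, B_eval a b ha0 ha hb0 hb, main_nonzero a b ha0 ha hb0 hb]
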